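-- pv_equiv track=rewrite | github.com/abdullahaarifshaikh/url_shortner | app/main.py | encode_base62
-- ===== SOURCE A (Python) =====
-- import string
--
-- ALPHABET = string.digits + string.ascii_letters  # base62: 0-9A-Za-z
--
-- def encode_base62(num: int) -> str:
--     if num == 0:
--         return ALPHABET[0]
--     arr = []
--     base = len(ALPHABET)
--     while num:
--         num, rem = divmod(num, base)
--         arr.append(ALPHABET[rem])
--     arr.reverse()
--     return ''.join(arr)
-- ===== SOURCE B (Python) =====
-- import string
--
-- ALPHABET = string.digits + string.ascii_letters  # base62: 0-9a-zA-Z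
--
-- def encode_base62(num: int) -> str:
--     if num == 0:
--         return ALPHABET[0]
--
--     def rec(n):
--         if n == 0:
--             return ''
--         q, r = divmod(n, 62)
--         return rec(q) + ALPHABET[r]
--
--     return rec(num)
-- ===== Notes on version B (the rewrite author's own statement) =====
-- stated objective: simpler
-- what changed: Replaced the iterate-append-reverse loop by a recursive helper that emits most-significant digits first via the call stack, removing the digit list and the reverse step.
import Mathlib
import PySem

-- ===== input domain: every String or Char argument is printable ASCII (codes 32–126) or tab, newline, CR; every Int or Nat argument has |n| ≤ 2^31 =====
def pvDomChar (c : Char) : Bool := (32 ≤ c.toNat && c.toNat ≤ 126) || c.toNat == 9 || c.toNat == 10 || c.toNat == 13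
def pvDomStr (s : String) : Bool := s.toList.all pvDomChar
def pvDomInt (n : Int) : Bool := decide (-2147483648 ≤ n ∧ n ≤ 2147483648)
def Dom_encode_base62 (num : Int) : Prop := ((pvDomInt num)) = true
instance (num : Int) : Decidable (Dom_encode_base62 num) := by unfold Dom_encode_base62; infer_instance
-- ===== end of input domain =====

-- ===== PORT A =====
-- B differs from A only in decomposition (recursion instead of loop+reverse); equal on all num ≥ 0.
-- ALPHABET = string.digits + string.ascii_letters
def pvAlphabet : List Char := "0123456789abcdefghijklmnopqrstuvwxyzABCDEFGHIJKLMNOPQRSTUVWXYZ".toList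

-- ALPHABET[i]; every index used is in range 0..61, the default is never reached
def pvDigit (i : Int) : Char := (PySem.List.pyGet? pvAlphabet i).getD ' '

-- the 'while num:' loop; fuel only makes it total (for num < 0 Python A loops forever, outside Pre_)
def encodeLoop : Nat → Int → List Char → List Char
  | 0, _, arr => arr
  | fuel + 1, num, arr =>
    if num = 0 then arr
    else encodeLoop fuel (PySem.Int.floordiv num 62)
           (arr ++ [pvDigit (PySem.Int.mod num 62)])

def encode_base62 (num : Int) : String :=
  if num = 0 then String.ofList [pvDigit 0]
  else String.ofList ((encodeLoop (num.toNat + 1) num []).reverse)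

-- ===== PORT B =====
-- the inner 'rec' of Source B; strings as List Char (PySem model); the n < 0 arm of the guard only
-- makes it total (Python B hits the recursion limit there, outside Pre_)
def recDigits (n : Int) : List Char :=
  if n ≤ 0 then []
  else recDigits (PySem.Int.floordiv n 62) ++ [pvDigit (PySem.Int.mod n 62)]
termination_by n.toNat
decreasing_by
  have h2 : PySem.Int.floordiv n 62 = n / 62 := PySem.Int.floordiv_eq_ediv_of_pos (by omega)
  have h3 : n / 62 < n := by omega
  have h4 : 0 ≤ n / 62 := by omega
  rw [h2]; omega

def encode_base62_alt (num : Int) : String :=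
  if num = 0 then String.ofList [pvDigit 0]
  else String.ofList (recDigits num)

-- ===== PRECONDITION & SPEC =====
-- Python A's while loop never terminates for num < 0 (num//62 stays -1), so A returns only on num ≥ 0.
def Pre_encode_base62 (num : Int) : Prop := 0 ≤ num
instance (num : Int) : Decidable (Pre_encode_base62 num) := by unfold Pre_encode_base62; infer_instance
def pvWitness_encode_base62 : Int := (123)
def Spec_encode_base62 (num : Int) (out : String) : Prop := out = encode_base62_alt num
instance (num : Int) (out : String) : Decidable (Spec_encode_base62 num out) := by unfold Spec_encode_base62; infer_instance

-- ===== CLAIM (what is proved, stated in full; the proofs are below) =====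
def Claim_equal_encode_base62 : Prop := ∀ (num : Int), Dom_encode_base62 num → Pre_encode_base62 num → Spec_encode_base62 num (encode_base62 num)

-- ===== LEMMAS AND PROOFS =====\n
lemma encodeLoop_zero (fuel : Nat) (arr : List Char) : encodeLoop fuel 0 arr = arr := by
  cases fuel <;> simp [encodeLoop]

lemma encodeLoop_eq_recDigits (fuel : Nat) (n : Int) (arr : List Char)
    (hn : 0 < n) (hf : n.toNat ≤ fuel) :
    (encodeLoop fuel n arr).reverse = recDigits n ++ arr.reverse := by
  induction fuel generalizing n arr with
  | zero => omega
  | succ fuel ih =>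
    have hq : PySem.Int.floordiv n 62 = n / 62 := PySem.Int.floordiv_eq_ediv_of_pos (by omega)
    have hlt : n / 62 < n := by omega
    have hge : 0 ≤ n / 62 := by omega
    rw [encodeLoop, if_neg (by omega)]
    rw [recDigits, if_neg (by omega)]
    by_cases h0 : n / 62 = 0
    · rw [hq, h0, encodeLoop_zero, recDigits]
      simp
    · rw [hq, ih (n / 62) _ (by omega) (by omega)]
      simp

theorem encode_base62_spec : Claim_equal_encode_base62 := by
  intro num _ hpre
  unfold Spec_encode_base62 encode_base62 encode_base62_alt
  by_cases h0 : num = 0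
  · simp [h0]
  · rw [if_neg h0, if_neg h0,
      encodeLoop_eq_recDigits (num.toNat + 1) num [] (by unfold Pre_encode_base62 at hpre; omega) (by omega)]
    simp
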